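-- pv_equiv track=rewrite | github.com/kotsmile/venture_scan_repo | venture_scan/text_processing.py | convert
-- ===== SOURCE A (Python) =====
-- def convert(list_, sep='.'):
--     l = []
--     for i in range(len(list_)):
--         try:
--             if list_[i] not in ['-', '<', '>']:
--                 l.append(list_[i])
--             elif list_[i] + list_[i + 1] == '->':
--                 l.append('->')
--             elif list_[i] + list_[i + 1] == '<-':
--                 l.append('<-')
--             elif list_[i] + list_[i + 1] == '-<':
--                 l.append('<-')
--         except IndexError:
--             pass
--     new_l = l[:]
--     l = []
--     prev = ''
--     for i in new_l:
--         if prev != i: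
--             l.append(i)
--         prev = i
--
--     ls = []
--     a = []
--     for i in l:
--         if i != sep:
--             a.append(i)
--         else:
--             ls.append(a[:])
--             a = []
--     ls.append(a[:])
--     new_ls = []
--     for sent in ls:
--         temp = []
--         for w in sent:
--             if not (w == '>' or w == '<' or w == '-'):
--                 temp.append(w)
--         new_ls.append(temp)
--
--     return new_ls
-- ===== SOURCE B (Python) =====
-- def convert(list_, sep='.'):
--     # Single fused pass: tokenize (arrow-combining), consecutive-dedup, split on
--     # sep, and drop bare '-'/'<'/'>' are done per element while building the
--     # nested result directly, instead of four staged list passes.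
--     ls = []
--     a = []
--     prev = ''
--     n = len(list_)
--     for i in range(n):
--         x = list_[i]
--         if x not in ('-', '<', '>'):
--             tok = x
--         elif i + 1 < n:
--             pair = x + list_[i + 1]
--             if pair == '->':
--                 tok = '->'
--             elif pair == '<-' or pair == '-<':
--                 tok = '<-'
--             else:
--                 continue
--         else:
--             continue
--         if tok == prev:
--             continue
--         prev = tok
--         if tok == sep:
--             ls.append(a)
--             a = []
--         elif tok not in ('>', '<', '-'):
--             a.append(tok)
--     ls.append(a)
--     return ls
-- ===== Notes on version B (the rewrite author's own statement) =====
-- stated objective: simpler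
-- what changed: Replaces A's four staged list passes (tokenize with arrow-combining, consecutive dedup, split on sep, per-group filtering) by one fused loop over the indices that computes each token and directly builds the nested result with three accumulators (groups, current group, previous token).
import Mathlib
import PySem

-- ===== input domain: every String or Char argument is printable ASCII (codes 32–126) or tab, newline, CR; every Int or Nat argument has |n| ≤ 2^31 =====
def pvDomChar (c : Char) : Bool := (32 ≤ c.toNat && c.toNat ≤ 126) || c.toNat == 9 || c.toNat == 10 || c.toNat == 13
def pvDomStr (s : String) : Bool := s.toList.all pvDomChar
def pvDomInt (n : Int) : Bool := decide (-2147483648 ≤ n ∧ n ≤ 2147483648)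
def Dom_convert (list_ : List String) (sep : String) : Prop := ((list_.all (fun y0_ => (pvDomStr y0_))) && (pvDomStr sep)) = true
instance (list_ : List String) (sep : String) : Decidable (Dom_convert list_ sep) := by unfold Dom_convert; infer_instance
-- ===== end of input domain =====

-- B fuses A's four staged passes (tokenize, consecutive-dedup, split on sep, filter) into one
-- loop over the indices building the nested result directly (objective: simpler, one pass).

-- ===== PORT A =====
-- String '+' and '==' are ported on .toList (code points), exact for Python str.
def convert (list_ : List String) (sep : String) : List (List String) :=
  -- l = []; for i in range(len(list_)): try: … except IndexError: pass
  let l : List String := (PySem.List.pyRange 0 list_.length 1).foldl (fun l i =>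
    match PySem.List.pyGet? list_ i with
    | none => l  -- IndexError on list_[i] (unreachable for i in range), swallowed
    | some x =>
      if ¬ (x = "-" ∨ x = "<" ∨ x = ">") then l ++ [x]
      else match PySem.List.pyGet? list_ (i + 1) with
        | none => l  -- IndexError on list_[i+1], swallowed by `except: pass`
        | some y =>
          if x.toList ++ y.toList = ['-', '>'] then l ++ ["->"]
          else if x.toList ++ y.toList = ['<', '-'] then l ++ ["<-"]
          else if x.toList ++ y.toList = ['-', '<'] then l ++ ["<-"]
          else l) []
  -- new_l = l[:]; l = []; prev = ''; consecutive dedup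
  let ded := (l.foldl (fun (s : List String × String) i =>
      (if s.2 ≠ i then s.1 ++ [i] else s.1, i)) (([] : List String), ""))
  -- ls = []; a = []; split on sep
  let sa := ded.1.foldl (fun (s : List (List String) × List String) i =>
      if i ≠ sep then (s.1, s.2 ++ [i]) else (s.1 ++ [s.2], ([] : List String))) ([], [])
  let ls := sa.1 ++ [sa.2]
  -- new_ls = []; filter '>','<','-' out of every sentence
  ls.foldl (fun new_ls sent =>
    new_ls ++ [sent.foldl (fun temp w =>
      if ¬ (w = ">" ∨ w = "<" ∨ w = "-") then temp ++ [w] else temp) []]) []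

-- ===== PORT B =====
def convert_alt (list_ : List String) (sep : String) : List (List String) :=
  let n : Int := list_.length
  let st := (PySem.List.pyRange 0 n 1).foldl
    (fun (s : List (List String) × List String × String) i =>
      -- compute the token at index i ('continue' = none)
      let tok? : Option String :=
        match PySem.List.pyGet? list_ i with
        | none => none
        | some x =>
          if ¬ (x = "-" ∨ x = "<" ∨ x = ">") then some x
          else if i + 1 < n then
            match PySem.List.pyGet? list_ (i + 1) with
            | none => none
            | some y =>
              let pair := x.toList ++ y.toList
              if pair = ['-', '>'] then some "->"
              else if pair = ['<', '-'] ∨ pair = ['-', '<'] then some "<-"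
              else none
          else none
      match tok? with
      | none => s
      | some tok =>
        if tok = s.2.2 then s                                           -- consecutive dedup
        else if tok = sep then (s.1 ++ [s.2.1], [], tok)                 -- close the group
        else if ¬ (tok = ">" ∨ tok = "<" ∨ tok = "-") then (s.1, s.2.1 ++ [tok], tok)
        else (s.1, s.2.1, tok))
    (([] : List (List String)), ([] : List String), "")
  st.1 ++ [st.2.1]

-- ===== PRECONDITION & SPEC =====
def Spec_convert (list_ : List String) (sep : String) (out : List (List String)) : Prop := out = convert_alt list_ sep
instance (list_ : List String) (sep : String) (out : List (List String)) : Decidable (Spec_convert list_ sep out) := by unfold Spec_convert; infer_instance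

-- ===== CLAIM (what is proved, stated in full; the proofs are below) =====
def Claim_equal_convert : Prop := ∀ (list_ : List String) (sep : String), Dom_convert list_ sep → Spec_convert list_ sep (convert list_ sep)

-- ===== LEMMAS AND PROOFS =====

-- the (0 or 1) tokens pass 1 of A emits at index i
def tokAt (list_ : List String) (i : Int) : List String :=
  match PySem.List.pyGet? list_ i with
  | none => []
  | some x =>
    if ¬ (x = "-" ∨ x = "<" ∨ x = ">") then [x]
    else match PySem.List.pyGet? list_ (i + 1) with
      | none => []
      | some y =>
        if x.toList ++ y.toList = ['-', '>'] then ["->"]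
        else if x.toList ++ y.toList = ['<', '-'] then ["<-"]
        else if x.toList ++ y.toList = ['-', '<'] then ["<-"]
        else []

-- A's filter of pass 4
def fw (sent : List String) : List String :=
  sent.filter (fun w => decide ¬ (w = ">" ∨ w = "<" ∨ w = "-"))

-- A's consecutive dedup of pass 2, as a recursion
def dedup (toks : List String) (prev : String) : List String :=
  match toks with
  | [] => []
  | t :: ts => (if prev ≠ t then [t] else []) ++ dedup ts t

-- A's split step (pass 3)
def step3 (sep : String) (s : List (List String) × List String) (i : String) :
    List (List String) × List String :=
  if i ≠ sep then (s.1, s.2 ++ [i]) else (s.1 ++ [s.2], ([] : List String))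

-- B's fused step, on an already-computed token
def dstep (sep : String) (s : List (List String) × List String × String) (tok : String) :
    List (List String) × List String × String :=
  if tok = s.2.2 then s
  else if tok = sep then (s.1 ++ [s.2.1], [], tok)
  else if ¬ (tok = ">" ∨ tok = "<" ∨ tok = "-") then (s.1, s.2.1 ++ [tok], tok)
  else (s.1, s.2.1, tok)

lemma stepA_eq_tokAt (list_ : List String) (l : List String) (i : Int) :
    (match PySem.List.pyGet? list_ i with
    | none => l
    | some x =>
      if ¬ (x = "-" ∨ x = "<" ∨ x = ">") then l ++ [x]
      else match PySem.List.pyGet? list_ (i + 1) with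
        | none => l
        | some y =>
          if x.toList ++ y.toList = ['-', '>'] then l ++ ["->"]
          else if x.toList ++ y.toList = ['<', '-'] then l ++ ["<-"]
          else if x.toList ++ y.toList = ['-', '<'] then l ++ ["<-"]
          else l) = l ++ tokAt list_ i := by
  unfold tokAt
  cases PySem.List.pyGet? list_ i with
  | none => simp
  | some x =>
    by_cases h : x = "-" ∨ x = "<" ∨ x = ">"
    · simp only [h, not_true_eq_false, if_false]
      cases PySem.List.pyGet? list_ (i + 1) with
      | none => simp
      | some y => dsimp only; split_ifs <;> simp
    · simp [h]

lemma dedup_fold (toks : List String) : ∀ (acc : List String) (prev : String),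
    (toks.foldl (fun (s : List String × String) i =>
      (if s.2 ≠ i then s.1 ++ [i] else s.1, i)) (acc, prev)).1 = acc ++ dedup toks prev := by
  induction toks with
  | nil => intro acc prev; simp [dedup]
  | cons t ts ih =>
    intro acc prev
    rw [List.foldl_cons]
    dsimp only
    by_cases h : prev = t
    · rw [if_neg (by simp [h]), ih, dedup]
      simp [h]
    · rw [if_pos (by simp [h]), ih, dedup]
      simp [h]

-- B's token option agrees with tokAt for nonnegative i
lemma btok_eq_tokAt (list_ : List String) (i : Int) (hi : 0 ≤ i) :
    (match PySem.List.pyGet? list_ i with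
      | none => none
      | some x =>
        if ¬ (x = "-" ∨ x = "<" ∨ x = ">") then some x
        else if i + 1 < (list_.length : Int) then
          match PySem.List.pyGet? list_ (i + 1) with
          | none => none
          | some y =>
            let pair := x.toList ++ y.toList
            if pair = ['-', '>'] then some "->"
            else if pair = ['<', '-'] ∨ pair = ['-', '<'] then some "<-"
            else none
        else none : Option String).toList = tokAt list_ i := by
  unfold tokAt
  cases PySem.List.pyGet? list_ i with
  | none => simp
  | some x =>
    by_cases h : x = "-" ∨ x = "<" ∨ x = ">"
    · simp only [h, not_true_eq_false, if_false]
      have hnone : PySem.List.pyGet? list_ (i + 1) = none ↔ ¬ (i + 1 < (list_.length : Int)) := by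
        rw [PySem.List.pyGet?_eq_none_iff]
        simp [PySem.Raise.InRange]
        omega
      by_cases hlt : i + 1 < (list_.length : Int)
      · simp only [hlt, if_true]
        cases hg : PySem.List.pyGet? list_ (i + 1) with
        | none => exact absurd (hnone.mp hg) (by simpa using hlt)
        | some y => dsimp only; split_ifs with h1 h2 h3 h4 h5 <;> simp_all
      · rw [hnone.mpr hlt]
        simp [hlt]
    · simp [h]

-- generic: a fold that skips `none` tokens is a fold over the emitted tokens
lemma foldl_opt {S : Type} (l : List Int) (f : Int → Option String)
    (g : S → String → S) (s : S) :
    l.foldl (fun s i => match f i with | none => s | some t => g s t) s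
      = (l.flatMap (fun i => (f i).toList)).foldl g s := by
  induction l generalizing s with
  | nil => rfl
  | cons i l ih =>
    simp only [List.foldl_cons, List.flatMap_cons, List.foldl_append]
    cases f i <;> simp [ih]

-- the core fusion: B's fused loop over a token stream equals A's staged passes 2–4
lemma fuse (sep : String) (toks : List String) :
    ∀ (prev : String) (ls : List (List String)) (a : List String),
    (toks.foldl (dstep sep) (ls.map fw, fw a, prev)).1
      ++ [(toks.foldl (dstep sep) (ls.map fw, fw a, prev)).2.1]
    = ((((dedup toks prev).foldl (step3 sep) (ls, a)).1
        ++ [((dedup toks prev).foldl (step3 sep) (ls, a)).2]).map fw) := by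
  induction toks with
  | nil => intro prev ls a; simp [dedup]
  | cons t ts ih =>
    intro prev ls a
    by_cases hp : t = prev
    · have : dstep sep (ls.map fw, fw a, prev) t = (ls.map fw, fw a, prev) := by
        simp [dstep, hp]
      simp only [dedup, List.foldl_cons, this]
      have h2 : (if prev ≠ t then [t] else []) = [] := by simp [hp]
      rw [h2, List.nil_append, hp]
      exact ih prev ls a
    · have h2 : (if prev ≠ t then [t] else []) = [t] := by simp [Ne.symm hp]
      simp only [dedup, List.foldl_cons, h2, List.singleton_append]
      by_cases hs : t = sep
      · have hd : dstep sep (ls.map fw, fw a, prev) t = (ls.map fw ++ [fw a], [], t) := by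
          subst hs; simp [dstep, hp]
        have h3 : step3 sep (ls, a) t = (ls ++ [a], []) := by simp [step3, hs]
        rw [hd, h3]
        have := ih t (ls ++ [a]) []
        simpa [fw] using this
      · by_cases hf : t = ">" ∨ t = "<" ∨ t = "-"
        · have hd : dstep sep (ls.map fw, fw a, prev) t = (ls.map fw, fw a, t) := by
            simp [dstep, hp, hs, hf]
          have h3 : step3 sep (ls, a) t = (ls, a ++ [t]) := by simp [step3, hs]
          rw [hd, h3]
          have hfw : fw (a ++ [t]) = fw a := by simp [fw]; tauto
          have := ih t ls (a ++ [t])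
          rw [hfw] at this
          exact this
        · have hd : dstep sep (ls.map fw, fw a, prev) t = (ls.map fw, fw a ++ [t], t) := by
            simp [dstep, hp, hs, hf]
          have h3 : step3 sep (ls, a) t = (ls, a ++ [t]) := by simp [step3, hs]
          rw [hd, h3]
          have hfw : fw (a ++ [t]) = fw a ++ [t] := by simp [fw]; tauto
          have := ih t ls (a ++ [t])
          rw [hfw] at this
          exact this

-- ===== VERDICT (by name: the statement is the Claim_ definition above) =====
theorem convert_spec : Claim_equal_convert := by
  intro list_ sep _
  show convert list_ sep = convert_alt list_ sep
  have hfw : ∀ sent : List String,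
      sent.foldl (fun temp w => if ¬ (w = ">" ∨ w = "<" ∨ w = "-") then temp ++ [w] else temp) ([] : List String) = fw sent := by
    intro sent
    simpa [fw] using PySem.List.foldl_append_ite_eq_filter
      (p := fun w => ¬ (w = ">" ∨ w = "<" ∨ w = "-")) (l := sent) (acc := ([] : List String))
  have hA : convert list_ sep =
      (((dedup ((PySem.List.pyRange 0 (list_.length : Int) 1).flatMap (tokAt list_)) "").foldl (step3 sep) ([], [])).1
        ++ [((dedup ((PySem.List.pyRange 0 (list_.length : Int) 1).flatMap (tokAt list_)) "").foldl (step3 sep) ([], [])).2]).map fw := by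
    unfold convert
    dsimp only
    rw [PySem.List.foldl_congr_mem (PySem.List.pyRange 0 (list_.length : Int) 1) _
          (fun l i => l ++ tokAt list_ i) [] (fun acc i _ => stepA_eq_tokAt list_ acc i),
        PySem.List.foldl_append_eq_flatMap (g := tokAt list_), List.nil_append,
        dedup_fold, List.nil_append,
        PySem.List.foldl_append_singleton_eq_map, List.nil_append]
    rw [show (List.foldl (fun temp w => if ¬ (w = ">" ∨ w = "<" ∨ w = "-") then temp ++ [w] else temp)
          ([] : List String)) = fw from funext hfw]
    rfl
  have hB : convert_alt list_ sep =
      (((PySem.List.pyRange 0 (list_.length : Int) 1).flatMap (tokAt list_)).foldl (dstep sep) ([], [], "")).1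
        ++ [(((PySem.List.pyRange 0 (list_.length : Int) 1).flatMap (tokAt list_)).foldl (dstep sep) ([], [], "")).2.1] := by
    unfold convert_alt
    dsimp only
    rw [foldl_opt]
    rw [List.flatMap_congr (g := tokAt list_)
      (fun i hi => btok_eq_tokAt list_ i ((PySem.List.mem_pyRange_one.mp hi).1))]
    rfl
  rw [hA, hB]
  exact (fuse sep ((PySem.List.pyRange 0 (list_.length : Int) 1).flatMap (tokAt list_)) "" [] []).symm
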